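-- pv_equiv track=rewrite | github.com/mradityagoyal/python | WalkingRobot.py | robots
-- ===== SOURCE A (Python) =====
-- def robots(commands, obstacles):
--     """
--     :type commands: List[int]
--     :type obstacles: List[List[int]]
--     :rtype: int
--     """
--     obs = frozenset([(v[0], v[1]) for v in obstacles])
--     current =(0, 0)
--     dir = (0,1) # facing north.
--     max_dist = 0
--     for cmd in commands:
--         if cmd == -2:
--             if dir == (0,1): dir = (-1,0)
--             elif dir == (-1,0): dir = (0,-1)
--             elif dir == (0,-1): dir = (1,0)
--             elif dir == (1,0): dir = (0,1)
--         elif cmd == -1: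
--             if dir == (0,1): dir = (1,0)
--             elif dir == (1,0): dir = (0,-1)
--             elif dir == (0,-1): dir = (-1,0)
--             elif dir == (-1,0): dir = (0,1)
--         else:
--             for i in range(0, cmd):
--                 next = (current[0] + dir[0], current[1] + dir[1])
--                 # if next is in obstacle.. do nothing .. else current = next
--                 if(next not in obs): current = next
--             max_dist = max(max_dist, current[0]**2 + current[1]**2)
--     return max_dist
-- ===== SOURCE B (Python) =====
-- def robots(commands, obstacles):
--     x, y = 0, 0
--     dx, dy = 0, 1
--     best = 0
--     for cmd in commands:
--         if cmd == -2:
--             dx, dy = -dy, dx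
--         elif cmd == -1:
--             dx, dy = dy, -dx
--         else:
--             steps = cmd
--             for o in obstacles:
--                 ox, oy = o[0], o[1]
--                 t = None
--                 if dx != 0 and oy == y and (ox - x) * dx > 0:
--                     t = (ox - x) * dx
--                 elif dy != 0 and ox == x and (oy - y) * dy > 0:
--                     t = (oy - y) * dy
--                 if t is not None and t - 1 < steps:
--                     steps = t - 1
--             if steps > 0:
--                 x += dx * steps
--                 y += dy * steps
--             best = max(best, x * x + y * y)
--     return best
-- ===== Notes on version B (the rewrite author's own statement) =====
-- stated objective: faster
-- what changed: Replaces A's unit-step simulation (cmd set-lookups per move command) by a per-command closed form: one scan over the obstacle list computes the distance to the nearest blocking obstacle and the whole move is done in a single jump.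
-- outside the precondition, e.g. on robots([3], [[1]]): A raises IndexError, B raises IndexError
import Mathlib
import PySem

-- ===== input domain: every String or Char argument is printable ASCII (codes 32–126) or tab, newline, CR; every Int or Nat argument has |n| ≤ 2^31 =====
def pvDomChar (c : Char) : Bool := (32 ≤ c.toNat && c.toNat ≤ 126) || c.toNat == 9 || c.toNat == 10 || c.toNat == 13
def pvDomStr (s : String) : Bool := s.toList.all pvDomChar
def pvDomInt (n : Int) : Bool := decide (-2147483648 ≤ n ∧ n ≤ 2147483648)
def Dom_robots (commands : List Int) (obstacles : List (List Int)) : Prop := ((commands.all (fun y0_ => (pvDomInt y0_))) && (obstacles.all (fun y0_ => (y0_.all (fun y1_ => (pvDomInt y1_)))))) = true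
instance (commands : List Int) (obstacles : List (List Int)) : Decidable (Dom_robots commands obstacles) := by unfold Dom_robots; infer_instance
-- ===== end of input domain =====

-- B replaces A's unit-step walk by a per-command scan of the obstacle list that finds the
-- nearest blocker and jumps in one move (objective: faster — measured).

-- ===== PORT A =====
-- loop body of A's 'for cmd in commands' (state: current, dir, max_dist)
def stepA (obs : List (Int × Int)) (st : (Int × Int) × (Int × Int) × Int) (cmd : Int) :
    (Int × Int) × (Int × Int) × Int :=
  let cur := st.1
  let dir := st.2.1
  let md := st.2.2
  if cmd = -2 then
    (cur,
     (if dir = ((0 : Int), (1 : Int)) then ((-1 : Int), (0 : Int))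
      else if dir = (-1, 0) then (0, -1)
      else if dir = (0, -1) then (1, 0)
      else if dir = (1, 0) then (0, 1)
      else dir), md)
  else if cmd = -1 then
    (cur,
     (if dir = ((0 : Int), (1 : Int)) then ((1 : Int), (0 : Int))
      else if dir = (1, 0) then (0, -1)
      else if dir = (0, -1) then (-1, 0)
      else if dir = (-1, 0) then (0, 1)
      else dir), md)
  else
    let cur' := (PySem.List.pyRange 0 cmd 1).foldl
      (fun c _ =>
        let nxt := (c.1 + dir.1, c.2 + dir.2)
        if nxt ∈ obs then c else nxt) cur
    (cur', dir, max md (cur'.1 ^ 2 + cur'.2 ^ 2))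

def robots (commands : List Int) (obstacles : List (List Int)) : Int :=
  let obs : List (Int × Int) :=
    PySem.Set.ofList (obstacles.map (fun v => (PySem.List.pyGetD v 0 0, PySem.List.pyGetD v 1 0)))
  (commands.foldl (stepA obs) ((0, 0), (0, 1), 0)).2.2

-- ===== PORT B =====
-- distance to obstacle o along direction (dx,dy) from (x,y), if it lies strictly ahead
def tOf (dx dy x y : Int) (o : List Int) : Option Int :=
  let ox := PySem.List.pyGetD o 0 0
  let oy := PySem.List.pyGetD o 1 0
  if dx ≠ 0 ∧ oy = y ∧ (ox - x) * dx > 0 then some ((ox - x) * dx)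
  else if dy ≠ 0 ∧ ox = x ∧ (oy - y) * dy > 0 then some ((oy - y) * dy)
  else none

-- loop body of B's 'for cmd in commands' (state: x, y, dx, dy, best)
def stepB (obstacles : List (List Int)) (st : Int × Int × Int × Int × Int) (cmd : Int) :
    Int × Int × Int × Int × Int :=
  let x := st.1
  let y := st.2.1
  let dx := st.2.2.1
  let dy := st.2.2.2.1
  let best := st.2.2.2.2
  if cmd = -2 then (x, y, -dy, dx, best)
  else if cmd = -1 then (x, y, dy, -dx, best)
  else
    let steps := obstacles.foldl
      (fun s o =>
        match tOf dx dy x y o with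
        | some t => if t - 1 < s then t - 1 else s
        | none => s) cmd
    let x' := if steps > 0 then x + dx * steps else x
    let y' := if steps > 0 then y + dy * steps else y
    (x', y', dx, dy, max best (x' * x' + y' * y'))

def robots_alt (commands : List Int) (obstacles : List (List Int)) : Int :=
  (commands.foldl (stepB obstacles) (0, 0, 0, 1, 0)).2.2.2.2

-- ===== PRECONDITION & SPEC =====
-- Pre_ excludes obstacles with fewer than two coordinates, on which A raises IndexError.
def Pre_robots (commands : List Int) (obstacles : List (List Int)) : Prop :=
  ∀ o ∈ obstacles, 2 ≤ o.length
instance (commands : List Int) (obstacles : List (List Int)) : Decidable (Pre_robots commands obstacles) := by unfold Pre_robots; infer_instance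
def pvWitness_robots : List Int × List (List Int) := ([4, -1, 3], [[2, 4], [0, 2]])
def Spec_robots (commands : List Int) (obstacles : List (List Int)) (out : Int) : Prop := out = robots_alt commands obstacles
instance (commands : List Int) (obstacles : List (List Int)) (out : Int) : Decidable (Spec_robots commands obstacles out) := by unfold Spec_robots; infer_instance

-- ===== CLAIM (what is proved, stated in full; the proofs are below) =====
def Claim_equal_robots : Prop := ∀ (commands : List Int) (obstacles : List (List Int)), Dom_robots commands obstacles → Pre_robots commands obstacles → Spec_robots commands obstacles (robots commands obstacles)

-- ===== LEMMAS AND PROOFS =====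

def isDir (d : Int × Int) : Prop := d = (0, 1) ∨ d = (1, 0) ∨ d = (0, -1) ∨ d = (-1, 0)

-- a fold that ignores the list elements is an iterate
theorem foldl_const_iterate {α β : Type} (f : α → α) (l : List β) (a : α) :
    l.foldl (fun x _ => f x) a = f^[l.length] a := by
  induction l generalizing a with
  | nil => rfl
  | cons h t ih => simp [List.foldl, ih, Function.iterate_succ_apply]

-- alignment: tOf returns `some t` exactly when the obstacle is the point t ≥ 1 steps ahead
theorem tOf_iff (dx dy x y : Int) (hd : isDir (dx, dy)) (o : List Int) (t : Int) :
    tOf dx dy x y o = some t ↔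
      1 ≤ t ∧ (PySem.List.pyGetD o 0 0, PySem.List.pyGetD o 1 0) = (x + dx * t, y + dy * t) := by
  rcases hd with h | h | h | h <;>
    (injection h with h1 h2; subst h1; subst h2) <;>
    simp only [tOf] <;> split_ifs with h1 h2 <;>
    constructor <;> intro hh <;>
    first
      | (obtain ⟨ht, hp⟩ := hh; injection hp with hp1 hp2; exfalso; omega)
      | (obtain ⟨ht, hp⟩ := hh; injection hp with hp1 hp2;
         simp_all; omega)
      | (injection hh with hh; constructor <;> [omega; (apply Prod.ext <;> simp_all <;> omega)])
      | simp_all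
      | omega
      | (exfalso; omega)

-- characterisation of B's inner fold
theorem foldB_spec (dx dy x y : Int) (obstacles : List (List Int)) (s0 : Int) :
    let S := obstacles.foldl
      (fun s o => match tOf dx dy x y o with
        | some t => if t - 1 < s then t - 1 else s
        | none => s) s0
    S ≤ s0 ∧
    (S = s0 ∨ ∃ o ∈ obstacles, ∃ t, tOf dx dy x y o = some t ∧ S = t - 1) ∧
    (∀ o ∈ obstacles, ∀ t, tOf dx dy x y o = some t → S ≤ t - 1) := by
  induction obstacles generalizing s0 with
  | nil => exact ⟨le_refl _, Or.inl rfl, by simp⟩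
  | cons o rest ih =>
    simp only [List.foldl]
    rcases hto : tOf dx dy x y o with _ | t <;> simp only [hto]
    · obtain ⟨ih1, ih2, ih3⟩ := ih s0
      refine ⟨ih1, ?_, ?_⟩
      · rcases ih2 with h | ⟨o', ho', t', h1, h2⟩
        · exact Or.inl h
        · exact Or.inr ⟨o', List.mem_cons_of_mem _ ho', t', h1, h2⟩
      · intro o' ho' t' h1
        rcases List.mem_cons.mp ho' with rfl | ho'
        · rw [hto] at h1; exact absurd h1 (by simp)
        · exact ih3 o' ho' t' h1
    · by_cases hlt : t - 1 < s0
      · obtain ⟨ih1, ih2, ih3⟩ := ih (t - 1)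
        rw [if_pos hlt]
        refine ⟨by omega, ?_, ?_⟩
        · rcases ih2 with h | ⟨o', ho', t', h1, h2⟩
          · exact Or.inr ⟨o, List.mem_cons_self, t, hto, h⟩
          · exact Or.inr ⟨o', List.mem_cons_of_mem _ ho', t', h1, h2⟩
        · intro o' ho' t' h1
          rcases List.mem_cons.mp ho' with rfl | ho'
          · rw [hto] at h1; injection h1 with h1; omega
          · exact ih3 o' ho' t' h1
      · obtain ⟨ih1, ih2, ih3⟩ := ih s0
        rw [if_neg hlt]
        refine ⟨ih1, ?_, ?_⟩
        · rcases ih2 with h | ⟨o', ho', t', h1, h2⟩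
          · exact Or.inl h
          · exact Or.inr ⟨o', List.mem_cons_of_mem _ ho', t', h1, h2⟩
        · intro o' ho' t' h1
          rcases List.mem_cons.mp ho' with rfl | ho'
          · rw [hto] at h1; injection h1 with h1; omega
          · exact ih3 o' ho' t' h1

-- characterisation of A's inner iterate
theorem iterA_spec (pairs : List (Int × Int)) (dx dy x y : Int) (n : Nat) :
    ∃ m : Int, 0 ≤ m ∧ m ≤ (n : Int) ∧
      (∀ j : Int, 1 ≤ j → j ≤ m → (x + dx * j, y + dy * j) ∉ pairs) ∧
      (m = (n : Int) ∨ (x + dx * (m + 1), y + dy * (m + 1)) ∈ pairs) ∧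
      (fun (c : Int × Int) =>
        if (c.1 + dx, c.2 + dy) ∈ pairs then c else (c.1 + dx, c.2 + dy))^[n] (x, y)
        = (x + dx * m, y + dy * m) := by
  induction n with
  | zero => exact ⟨0, le_refl _, le_refl _, by intro j h1 h2 _; omega, Or.inl rfl, by simp⟩
  | succ n ih =>
    obtain ⟨m, hm0, hmn, hfree, hdisj, hiter⟩ := ih
    by_cases hb : (x + dx * (m + 1), y + dy * (m + 1)) ∈ pairs
    · refine ⟨m, hm0, by omega, hfree, Or.inr hb, ?_⟩
      rw [Function.iterate_succ_apply', hiter]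
      have : (x + dx * m + dx, y + dy * m + dy) = (x + dx * (m + 1), y + dy * (m + 1)) := by
        apply Prod.ext <;> simp <;> ring
      simp only [this, if_pos hb]
    · have hmn' : m = (n : Int) := by
        rcases hdisj with h | h
        · exact h
        · exact absurd h hb
      refine ⟨m + 1, by omega, by omega, ?_, Or.inl (by omega), ?_⟩
      · intro j h1 h2
        by_cases hj : j ≤ m
        · exact hfree j h1 hj
        · have : j = m + 1 := by omega
          subst this; exact hb
      · rw [Function.iterate_succ_apply', hiter]
        have heq : (x + dx * m + dx, y + dy * m + dy) = (x + dx * (m + 1), y + dy * (m + 1)) := by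
          apply Prod.ext <;> simp <;> ring
        rw [if_neg (by rw [heq]; exact hb), heq]

-- the heart: one move command produces the same position in both ports
theorem move_eq (obstacles : List (List Int)) (dx dy x y cmd : Int) (hd : isDir (dx, dy)) :
    let pairs := obstacles.map (fun v => (PySem.List.pyGetD v 0 0, PySem.List.pyGetD v 1 0))
    let curA := (PySem.List.pyRange 0 cmd 1).foldl
      (fun c _ =>
        let nxt := (c.1 + dx, c.2 + dy)
        if nxt ∈ PySem.Set.ofList pairs then c else nxt) (x, y)
    let S := obstacles.foldl
      (fun s o => match tOf dx dy x y o with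
        | some t => if t - 1 < s then t - 1 else s
        | none => s) cmd
    curA = ((if S > 0 then x + dx * S else x), (if S > 0 then y + dy * S else y)) := by
  intro pairs curA S
  obtain ⟨hS1, hS2, hS3⟩ := foldB_spec dx dy x y obstacles cmd
  have hmem : ∀ p : Int × Int, (p ∈ PySem.Set.ofList pairs) ↔ p ∈ pairs :=
    fun p => PySem.Set.mem_ofList pairs p
  -- obstacle membership ahead ↔ some tOf hit
  have hahead : ∀ t : Int, 1 ≤ t →
      ((x + dx * t, y + dy * t) ∈ pairs ↔ ∃ o ∈ obstacles, tOf dx dy x y o = some t) := by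
    intro t ht
    constructor
    · intro hp
      simp only [pairs, List.mem_map] at hp
      obtain ⟨o, ho, hpo⟩ := hp
      exact ⟨o, ho, (tOf_iff dx dy x y hd o t).mpr ⟨ht, hpo⟩⟩
    · rintro ⟨o, ho, hto⟩
      obtain ⟨_, hpo⟩ := (tOf_iff dx dy x y hd o t).mp hto
      simp only [pairs, List.mem_map]
      exact ⟨o, ho, hpo⟩
  have hcurA : curA = (fun (c : Int × Int) =>
      if (c.1 + dx, c.2 + dy) ∈ pairs then c else (c.1 + dx, c.2 + dy))^[cmd.toNat] (x, y) := by
    have := foldl_const_iterate (β := Int)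
      (fun (c : Int × Int) => if (c.1 + dx, c.2 + dy) ∈ pairs then c else (c.1 + dx, c.2 + dy))
      (PySem.List.pyRange 0 cmd 1) (x, y)
    simp only [curA]
    simp only [hmem]
    rw [this, PySem.List.length_pyRange_one]
    norm_num
  by_cases hpos : 0 < cmd
  · -- S ≥ 0 in this case
    have hS0 : 0 ≤ S := by
      rcases hS2 with h | ⟨o, ho, t, hto, hst⟩
      · omega
      · have := ((tOf_iff dx dy x y hd o t).mp hto).1; omega
    obtain ⟨m, hm0, hmn, hfree, hdisj, hiter⟩ := iterA_spec pairs dx dy x y cmd.toNat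
    have hcast : ((cmd.toNat : Int)) = cmd := by omega
    rw [hcast] at hmn hdisj
    -- m = S
    have hmS : m = S := by
      have h1 : ¬ m < S := by
        intro hlt
        have hmne : m ≠ cmd := by omega
        rcases hdisj with h | hblk
        · exact hmne h
        · obtain ⟨o, ho, hto⟩ := (hahead (m + 1) (by omega)).mp hblk
          have := hS3 o ho (m + 1) hto
          omega
      have h2 : ¬ S < m := by
        intro hlt
        rcases hS2 with h | ⟨o, ho, t, hto, hst⟩
        · omega
        · have ht1 := ((tOf_iff dx dy x y hd o t).mp hto).1
          have hblk : (x + dx * t, y + dy * t) ∈ pairs :=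
            (hahead t ht1).mpr ⟨o, ho, hto⟩
          exact hfree t ht1 (by omega) hblk
      omega
    rw [hcurA, hiter, hmS]
    by_cases hSp : S > 0
    · simp [hSp]
    · have h0 : S = 0 := by omega
      rw [h0]; simp
  · -- cmd ≤ 0 : no steps, and S ≤ cmd ≤ 0
    have : cmd.toNat = 0 := by omega
    rw [hcurA, this]
    have : ¬ S > 0 := by omega
    simp [this]

-- relate the two per-command states
def conv (st : (Int × Int) × (Int × Int) × Int) : Int × Int × Int × Int × Int :=
  (st.1.1, st.1.2, st.2.1.1, st.2.1.2, st.2.2)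

theorem step_eq (obstacles : List (List Int)) (st : (Int × Int) × (Int × Int) × Int)
    (hd : isDir st.2.1) (cmd : Int) :
    stepB obstacles (conv st) cmd
      = conv (stepA (PySem.Set.ofList (obstacles.map (fun v =>
          (PySem.List.pyGetD v 0 0, PySem.List.pyGetD v 1 0)))) st cmd)
    ∧ isDir (stepA (PySem.Set.ofList (obstacles.map (fun v =>
          (PySem.List.pyGetD v 0 0, PySem.List.pyGetD v 1 0)))) st cmd).2.1 := by
  obtain ⟨⟨x, y⟩, ⟨dx, dy⟩, md⟩ := st
  by_cases h2 : cmd = -2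
  · subst h2
    rcases hd with h | h | h | h <;> (injection h with h1 h2; subst h1; subst h2) <;>
      exact ⟨by simp [stepA, stepB, conv], by simp [stepA, isDir]⟩
  · by_cases h1 : cmd = -1
    · subst h1
      rcases hd with h | h | h | h <;> (injection h with ha hb; subst ha; subst hb) <;>
        exact ⟨by simp [stepA, stepB, conv], by simp [stepA, isDir]⟩
    · have hmv := move_eq obstacles dx dy x y cmd hd
      simp only at hmv
      constructor
      · simp only [stepA, stepB, conv, if_neg h2, if_neg h1]
        rw [hmv]
        simp only [Prod.mk.injEq, true_and]
        congr 1
        ring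
      · simp only [stepA, if_neg h2, if_neg h1]
        exact hd

theorem fold_eq (obstacles : List (List Int)) (commands : List Int)
    (st : (Int × Int) × (Int × Int) × Int) (hd : isDir st.2.1) :
    commands.foldl (stepB obstacles) (conv st)
      = conv (commands.foldl (stepA (PySem.Set.ofList (obstacles.map (fun v =>
          (PySem.List.pyGetD v 0 0, PySem.List.pyGetD v 1 0))))) st) := by
  induction commands generalizing st with
  | nil => rfl
  | cons cmd rest ih =>
    obtain ⟨heq, hd'⟩ := step_eq obstacles st hd cmd
    simp only [List.foldl, heq]
    exact ih _ hd'

-- ===== VERDICT (by name: the statement is the Claim_ definition above) =====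
theorem robots_spec : Claim_equal_robots := by
  intro commands obstacles _ _
  unfold Spec_robots robots robots_alt
  have := fold_eq obstacles commands ((0, 0), (0, 1), 0) (Or.inl rfl)
  simp only [conv] at this
  rw [this]
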